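-- pv_equiv track=rewrite | github.com/dyegofduarte/Cifra_Bloco | Cifra_Bloco.py | cifra_texto_bloco
-- ===== SOURCE A (Python) =====
-- def cifra_texto_affine(texto_claro, key):
--     # Define o alfabeto estendido com letras, números e espaço
--     alfabeto = "ABCDEFGHIJKLMNOPQRSTUVWXYZ0123456789 "
--     m = len(alfabeto)  # Tamanho do alfabeto
--
--     # Calcula os valores "a" e "b" a partir da chave
--     a = sum(ord(char) for char in key) % m  # Usa a soma dos códigos ASCII da chave
--     b = len(key) % m  # Usa o comprimento da chave como "b"
--
--     # Garante que "a" seja coprimo a "m" (usando tentativa e erro simples)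
--     while gcd(a, m) != 1:
--         a = (a + 1) % m
--
--     # Mapeia cada caractere do texto claro usando a fórmula da cifra de Afim
--     texto_cifrado = ""
--     for char in texto_claro:
--         if char in alfabeto:
--             x = alfabeto.index(char)
--             y = (a * x + b) % m
--             texto_cifrado += alfabeto[y]
--         else:
--             texto_cifrado += char  # Mantém caracteres que não estão no alfabeto
--
--     return texto_cifrado
--
-- def gcd(a, b):
--     while b:
--         a, b = b, a % b
--     return a
--
-- def expandir_palavra_chave(texto, palavra_chave):
--     palavra_chave_expandida = ""
--     indice_palavra_chave = 0
--     for _ in range(len(texto)):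
--         palavra_chave_expandida += palavra_chave[indice_palavra_chave]
--         indice_palavra_chave = (indice_palavra_chave + 1) % len(palavra_chave)
--     return palavra_chave_expandida
--
-- def cifra_texto_vigenere(texto_claro, palavra_chave):
--     texto_cifrado = ""
--     palavra_chave_repetida = expandir_palavra_chave(texto_claro, palavra_chave)
--     for i in range(len(texto_claro)):
--         char_texto = texto_claro[i]
--         char_chave = palavra_chave_repetida[i]
--         if char_texto.isalpha():
--             indice_texto = ord(char_texto) - ord('A')
--             indice_chave = ord(char_chave) - ord('A')
--             indice_cifrado = (indice_texto + indice_chave) % 26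
--             letra_cifrada = chr(indice_cifrado + ord('A'))
--         elif char_texto.isdigit():
--             indice_texto = ord(char_texto) - ord('0')
--             indice_chave = ord(char_chave) - ord('0')
--             indice_cifrado = (indice_texto + indice_chave) % 10
--             letra_cifrada = chr(indice_cifrado + ord('0'))
--         else:
--             letra_cifrada = char_texto
--         texto_cifrado += letra_cifrada
--     return texto_cifrado
--
-- def cifra_texto_alberti(text, key):
--     alfabeto = 'ABCDEFGHIJKLMNOPQRSTUVWXYZ0123456789'
--     texto_cifrado = []
--     conteudo = text
--     chave_expandida = (key * (len(conteudo) // len(key) + 1))[:len(conteudo)]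
--     for i in range(len(conteudo)):
--         if conteudo[i] in alfabeto:
--             pos_texto = alfabeto.find(conteudo[i])
--             pos_chave = alfabeto.find(chave_expandida[i])
--             pos_cifrada = (pos_chave - pos_texto) % len(alfabeto)
--             texto_cifrado.append(alfabeto[pos_cifrada])
--         else:
--             texto_cifrado.append(conteudo[i])
--     return ''.join(texto_cifrado)
--
-- def cifra_texto_bloco(text, key):
--     tamanho_bloco=16
--     blocos = [text[i:i + tamanho_bloco] for i in range(0, len(text), tamanho_bloco)]
--     texto_cifrado = ""
--     for bloco in blocos:
--         rodada = 2
--         for _ in range(rodada):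
--             bloco = cifra_texto_alberti(bloco, key)
--             bloco = cifra_texto_affine(bloco, key)
--             bloco = cifra_texto_vigenere(bloco, key)
--         texto_cifrado += bloco
--     return texto_cifrado
-- ===== SOURCE B (Python) =====
-- def cifra_texto_bloco(text, key):
--     # One flat pass: the pipeline is position-wise, and within a 16-char block
--     # every cipher picks key[(position in block) % len(key)], so a character at
--     # global index i is encrypted by a fixed per-(i % 16) character function.
--     AFF = "ABCDEFGHIJKLMNOPQRSTUVWXYZ0123456789 "
--     ALB = "ABCDEFGHIJKLMNOPQRSTUVWXYZ0123456789"
--     a = sum(ord(c) for c in key) % 37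
--     if a == 0:
--         a = 1  # 37 is prime: the gcd adjustment only ever moves 0 to 1
--     b = len(key) % 37
--
--     def step(c, k):
--         i = ALB.find(c)
--         if i >= 0:
--             c = ALB[(ALB.find(k) - i) % 36]
--         j = AFF.find(c)
--         if j >= 0:
--             c = AFF[(a * j + b) % 37]
--         if c.isalpha():
--             c = chr((ord(c) - 65 + (ord(k) - 65)) % 26 + 65)
--         elif c.isdigit():
--             c = chr((ord(c) - 48 + (ord(k) - 48)) % 10 + 48)
--         return c
--
--     out = []
--     for i, c in enumerate(text):
--         k = key[(i % 16) % len(key)]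
--         out.append(step(step(c, k), k))
--     return "".join(out)
-- ===== Notes on version B (the rewrite author's own statement) =====
-- stated objective: simpler
-- what changed: Replaces A's block-splitting with six whole-block cipher passes (2 rounds x alberti/affine/vigenere, each rebuilding the string and re-deriving the affine key) by one flat pass over the text that encrypts each character directly with the composed per-character pipeline, picking the key character from the global index (i % 16) % len(key); affine parameters are derived once.
import Mathlib
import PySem

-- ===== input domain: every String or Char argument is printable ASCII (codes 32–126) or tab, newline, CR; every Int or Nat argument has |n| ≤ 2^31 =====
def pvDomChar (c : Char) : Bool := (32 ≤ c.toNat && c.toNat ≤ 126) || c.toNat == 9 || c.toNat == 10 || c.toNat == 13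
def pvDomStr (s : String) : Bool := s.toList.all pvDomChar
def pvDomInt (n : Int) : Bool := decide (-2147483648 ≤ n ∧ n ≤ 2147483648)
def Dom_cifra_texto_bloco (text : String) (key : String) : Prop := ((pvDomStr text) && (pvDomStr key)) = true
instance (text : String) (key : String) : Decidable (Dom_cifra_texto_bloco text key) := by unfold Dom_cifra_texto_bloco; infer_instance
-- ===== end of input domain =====

-- B is one flat pass encrypting each character via the composed per-position pipeline,
-- instead of A's block splitting with six whole-block cipher passes (objective: simpler).


-- ===== PORT A =====
-- the two alphabet literals of A ("ABCDEFGHIJKLMNOPQRSTUVWXYZ0123456789 " has length 37, the other 36)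
def pvAlfAff : List Char := "ABCDEFGHIJKLMNOPQRSTUVWXYZ0123456789 ".toList
def pvAlfAlb : List Char := "ABCDEFGHIJKLMNOPQRSTUVWXYZ0123456789".toList

-- gcd(a, b): Python's while-loop Euclid (PySem.Int.mod is Python's %)
def pvGcd (a b : Int) : Int :=
  if h : b = 0 then a else pvGcd b (PySem.Int.mod a b)
termination_by b.natAbs
decreasing_by
  rcases lt_or_gt_of_ne h with hb | hb
  · have h1 := PySem.Int.mod_neg_bounds a hb
    omega
  · have h1 := PySem.Int.mod_nonneg a hb
    have h2 := PySem.Int.mod_lt a hb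
    omega

theorem pvGcd_natCast (k m : Nat) : pvGcd (m : Int) (k : Int) = (Nat.gcd m k : Int) := by
  induction k using Nat.strong_induction_on generalizing m with
  | _ k ih =>
    rw [pvGcd]
    split_ifs with h0
    · have hk : k = 0 := by exact_mod_cast h0
      subst hk; simp
    · have hk : k ≠ 0 := by exact_mod_cast h0
      rw [PySem.Int.mod_natCast, ih (m % k) (Nat.mod_lt _ (Nat.pos_of_ne_zero hk)) k]
      rw [Nat.gcd_comm k (m % k), ← Nat.gcd_rec, Nat.gcd_comm]

theorem pvAjusta_dvd {a : Int} (h : pvGcd a 37 ≠ 1) : (37 : Int) ∣ a := by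
  rw [pvGcd] at h
  simp only [show (37:Int) ≠ 0 by norm_num, dite_false] at h
  have h0 := PySem.Int.mod_nonneg a (show (0:Int) < 37 by norm_num)
  have h1 := PySem.Int.mod_lt a (show (0:Int) < 37 by norm_num)
  set r := PySem.Int.mod a 37 with hr
  have hrr : r = ((r.toNat : Nat) : Int) := by omega
  rw [hrr, show ((37:Int)) = ((37:Nat):Int) from rfl, pvGcd_natCast] at h
  have hg : Nat.gcd 37 r.toNat ≠ 1 := by exact_mod_cast h
  have hp : Nat.Prime 37 := by norm_num
  have hdvd : 37 ∣ r.toNat := by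
    by_contra hd
    exact hg ((Nat.Prime.coprime_iff_not_dvd hp).mpr hd)
  have : r.toNat = 0 := by
    rcases Nat.eq_zero_or_pos r.toNat with h' | h'
    · exact h'
    · exact absurd (Nat.le_of_dvd h' hdvd) (by omega)
  have : r = 0 := by omega
  exact (PySem.Int.mod_eq_zero_iff_dvd a 37).mp (by rw [← hr]; omega)

def pvAjusta (a : Int) : Int :=
  if h : pvGcd a 37 = 1 then a else pvAjusta (PySem.Int.mod (a + 1) 37)
termination_by (if (37 : Int) ∣ a then 1 else 0)
decreasing_by
  have hd := pvAjusta_dvd h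
  have h1 : PySem.Int.mod (a + 1) 37 = 1 := by
    rw [PySem.Int.mod_eq_emod_of_pos (show (0:Int) < 37 by norm_num)]
    omega
  rw [h1]
  have : ¬ ((37:Int) ∣ 1) := by norm_num
  simp [hd, this]

-- cifra_texto_affine (on List Char); `alfabeto.index(char)` under the membership guard is
-- `PySem.Chars.find` (first occurrence, guaranteed found)
def pvCifraAffine (texto_claro : List Char) (key : List Char) : List Char :=
  let m : Int := 37  -- len(alfabeto)
  let a := PySem.Int.mod ((key.map (fun c => (c.toNat : Int))).sum) m
  let b := PySem.Int.mod (key.length : Int) m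
  let a := pvAjusta a
  texto_claro.foldl (fun acc ch =>
    if PySem.Chars.isIn [ch] pvAlfAff then
      acc ++ [PySem.List.pyGetD pvAlfAff (PySem.Int.mod (a * PySem.Chars.find pvAlfAff [ch] + b) m) ' ']
    else acc ++ [ch]) []

-- expandir_palavra_chave: state = (accumulated chars, rotating index)
def pvExpandir (texto : List Char) (palavra_chave : List Char) : List Char :=
  ((List.range texto.length).foldl (fun (st : List Char × Int) _ =>
    (st.1 ++ [PySem.List.pyGetD palavra_chave st.2 ' '],
     PySem.Int.mod (st.2 + 1) (palavra_chave.length : Int))) ([], 0)).1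

-- cifra_texto_vigenere; `.isalpha()` / `.isdigit()` on the one-char string via PySem.Chars
def pvCifraVigenere (texto_claro : List Char) (palavra_chave : List Char) : List Char :=
  let rep := pvExpandir texto_claro palavra_chave
  (List.range texto_claro.length).foldl (fun acc (i : Nat) =>
    let ct := PySem.List.pyGetD texto_claro (i : Int) ' '
    let ck := PySem.List.pyGetD rep (i : Int) ' '
    let lc :=
      if PySem.Chars.strIsalpha [ct] then
        Char.ofNat ((PySem.Int.mod ((ct.toNat : Int) - 65 + ((ck.toNat : Int) - 65)) 26).toNat + 65)
      else if PySem.Chars.strIsdigit [ct] then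
        Char.ofNat ((PySem.Int.mod ((ct.toNat : Int) - 48 + ((ck.toNat : Int) - 48)) 10).toNat + 48)
      else ct
    acc ++ [lc]) []

-- cifra_texto_alberti; `alfabeto.find` is PySem.Chars.find (-1 when absent)
def pvCifraAlberti (text : List Char) (key : List Char) : List Char :=
  let n := text.length
  let chave := PySem.List.slice
    (PySem.List.pyRepeat key (PySem.Int.floordiv (n : Int) (key.length : Int) + 1)) none (some (n : Int))
  (List.range n).foldl (fun acc (i : Nat) =>
    let c := PySem.List.pyGetD text (i : Int) ' '
    if PySem.Chars.isIn [c] pvAlfAlb then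
      acc ++ [PySem.List.pyGetD pvAlfAlb
        (PySem.Int.mod (PySem.Chars.find pvAlfAlb [PySem.List.pyGetD chave (i : Int) ' ']
                        - PySem.Chars.find pvAlfAlb [c]) 36) ' ']
    else acc ++ [c]) []

def cifra_texto_bloco (text : String) (key : String) : String :=
  let l := text.toList
  let kl := key.toList
  let blocos := (PySem.List.pyRange 0 (l.length : Int) 16).map
    (fun i => PySem.List.slice l (some i) (some (i + 16)))
  String.ofList (blocos.foldl (fun acc bloco =>
    acc ++ (List.range 2).foldl
      (fun bl _ => pvCifraVigenere (pvCifraAffine (pvCifraAlberti bl kl) kl) kl) bloco) [])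

-- ===== PORT B =====
-- one application of the composed alberti → affine → vigenère pipeline to a single character
def pvStep (a b : Int) (k : Char) (c : Char) : Char :=
  let i := PySem.Chars.find pvAlfAlb [c]
  let c := if 0 ≤ i then
      PySem.List.pyGetD pvAlfAlb (PySem.Int.mod (PySem.Chars.find pvAlfAlb [k] - i) 36) ' '
    else c
  let j := PySem.Chars.find pvAlfAff [c]
  let c := if 0 ≤ j then
      PySem.List.pyGetD pvAlfAff (PySem.Int.mod (a * j + b) 37) ' '
    else c
  if PySem.Chars.strIsalpha [c] then
    Char.ofNat ((PySem.Int.mod ((c.toNat : Int) - 65 + ((k.toNat : Int) - 65)) 26).toNat + 65)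
  else if PySem.Chars.strIsdigit [c] then
    Char.ofNat ((PySem.Int.mod ((c.toNat : Int) - 48 + ((k.toNat : Int) - 48)) 10).toNat + 48)
  else c

def cifra_texto_bloco_alt (text : String) (key : String) : String :=
  let kl := key.toList
  let a0 := PySem.Int.mod ((kl.map (fun c => (c.toNat : Int))).sum) 37
  let a := if a0 = 0 then 1 else a0  -- 37 is prime: the gcd adjustment only ever moves 0 to 1
  let b := PySem.Int.mod (kl.length : Int) 37
  String.ofList ((PySem.List.enumerate text.toList).foldl (fun acc ic =>
    let k := PySem.List.pyGetD kl (PySem.Int.mod (PySem.Int.mod ic.1 16) (kl.length : Int)) ' '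
    acc ++ [pvStep a b k (pvStep a b k ic.2)]) [])

-- ===== PRECONDITION & SPEC =====
-- Pre_ excludes only key = "" with nonempty text, where A raises ZeroDivisionError
-- (and B raises IndexError/ZeroDivisionError too).
def Pre_cifra_texto_bloco (text : String) (key : String) : Prop := text = "" ∨ key ≠ ""
instance (text : String) (key : String) : Decidable (Pre_cifra_texto_bloco text key) := by
  unfold Pre_cifra_texto_bloco; infer_instance
def pvWitness_cifra_texto_bloco : String × String := ("HELLO WORLD, 42!", "Key9")
def Spec_cifra_texto_bloco (text : String) (key : String) (out : String) : Prop := out = cifra_texto_bloco_alt text key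
instance (text : String) (key : String) (out : String) : Decidable (Spec_cifra_texto_bloco text key out) := by unfold Spec_cifra_texto_bloco; infer_instance

-- ===== CLAIM (what is proved, stated in full; the proofs are below) =====
def Claim_equal_cifra_texto_bloco : Prop := ∀ (text : String) (key : String), Dom_cifra_texto_bloco text key → Pre_cifra_texto_bloco text key → Spec_cifra_texto_bloco text key (cifra_texto_bloco text key)

-- ===== LEMMAS AND PROOFS =====


-- per-character maps of the three ciphers, and A's composed round, used to state the bridge lemmas
def fAl (k c : Char) : Char :=
  if PySem.Chars.isIn [c] pvAlfAlb then
    PySem.List.pyGetD pvAlfAlb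
      (PySem.Int.mod (PySem.Chars.find pvAlfAlb [k] - PySem.Chars.find pvAlfAlb [c]) 36) ' '
  else c

def fAf (a b : Int) (c : Char) : Char :=
  if PySem.Chars.isIn [c] pvAlfAff then
    PySem.List.pyGetD pvAlfAff (PySem.Int.mod (a * PySem.Chars.find pvAlfAff [c] + b) 37) ' '
  else c

def fV (k c : Char) : Char :=
  if PySem.Chars.strIsalpha [c] then
    Char.ofNat ((PySem.Int.mod ((c.toNat : Int) - 65 + ((k.toNat : Int) - 65)) 26).toNat + 65)
  else if PySem.Chars.strIsdigit [c] then
    Char.ofNat ((PySem.Int.mod ((c.toNat : Int) - 48 + ((k.toNat : Int) - 48)) 10).toNat + 48)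
  else c

def pvG (a b : Int) (k c : Char) : Char := fV k (fAf a b (fAl k c))

def pvK (kl : List Char) (j : Nat) : Char := kl.getD (j % kl.length) ' '
def pvA0 (kl : List Char) : Int := PySem.Int.mod ((kl.map (fun c => (c.toNat : Int))).sum) 37
def pvB0 (kl : List Char) : Int := PySem.Int.mod (kl.length : Int) 37
def pvH (kl : List Char) (j : Nat) (c : Char) : Char :=
  pvG (pvAjusta (pvA0 kl)) (pvB0 kl) (pvK kl j) (pvG (pvAjusta (pvA0 kl)) (pvB0 kl) (pvK kl j) c)

theorem L_step (a b : Int) (k c : Char) : pvStep a b k c = fV k (fAf a b (fAl k c)) := by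
  have hIff : ∀ (s : List Char) (x : Char),
      (0 ≤ PySem.Chars.find s [x]) = (PySem.Chars.isIn [x] s = true) := by
    intro s x; rw [eq_iff_iff, PySem.Chars.find_nonneg_iff, PySem.Chars.isIn_iff_infix]
  simp only [pvStep, hIff, fAl, fAf, fV]

theorem L_ajusta (a : Int) (h0 : 0 ≤ a) (h1 : a < 37) : pvAjusta a = if a = 0 then 1 else a := by
  by_cases ha : a = 0
  · subst ha
    have hg0 : ¬ pvGcd 0 37 = 1 := by
      have := pvGcd_natCast 37 0
      simp at this
      rw [this]; norm_num
    have hg1 : pvGcd 1 37 = 1 := by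
      have := pvGcd_natCast 37 1
      simpa using this
    have hm : PySem.Int.mod ((0 : Int) + 1) 37 = 1 := by decide
    rw [pvAjusta, dif_neg hg0, hm, pvAjusta, dif_pos hg1]
    norm_num
  · have hg : pvGcd a 37 = 1 := by
      have hcast : a = ((a.toNat : Nat) : Int) := by omega
      rw [hcast, show ((37:Int)) = ((37:Nat):Int) from rfl, pvGcd_natCast]
      have hnd : ¬ (37 ∣ a.toNat) := by
        intro hd
        have h1' : a.toNat ≠ 0 := by omega
        have := Nat.le_of_dvd (Nat.pos_of_ne_zero h1') hd
        omega
      have hcop : Nat.Coprime 37 a.toNat :=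
        (Nat.Prime.coprime_iff_not_dvd (by norm_num)).mpr hnd
      have : Nat.gcd a.toNat 37 = 1 := Nat.coprime_comm.mp hcop
      rw [this]; norm_num
    rw [pvAjusta, dif_pos hg, if_neg ha]

theorem L_exp_aux (kl : List Char) (n : Nat) : ∀ (s0 : List Char) (j0 : Nat), j0 < kl.length →
    (List.range n).foldl (fun (st : List Char × Int) _ =>
      (st.1 ++ [PySem.List.pyGetD kl st.2 ' '],
       PySem.Int.mod (st.2 + 1) (kl.length : Int))) (s0, (j0 : Int))
    = (s0 ++ (List.range n).map (fun t => kl.getD ((j0 + t) % kl.length) ' '),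
       (((j0 + n) % kl.length : Nat) : Int)) := by
  induction n with
  | zero =>
    intro s0 j0 hj
    simp [Nat.mod_eq_of_lt hj]
  | succ n ih =>
    intro s0 j0 hj
    rw [List.range_succ, List.foldl_append, ih s0 j0 hj]
    simp only [List.foldl_cons, List.foldl_nil, PySem.List.pyGetD_natCast, Prod.mk.injEq]
    refine ⟨?_, ?_⟩
    · rw [List.map_append, ← List.append_assoc]
      simp
    · rw [show ((((j0 + n) % kl.length : Nat) : Int) + 1) = (((((j0 + n) % kl.length) + 1 : Nat)) : Int) by push_cast; ring]
      rw [PySem.Int.mod_natCast]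
      congr 1
      rw [Nat.mod_add_mod, Nat.add_assoc]

theorem L_exp (texto kl : List Char) (hk : kl ≠ []) :
    pvExpandir texto kl = (List.range texto.length).map (fun t => pvK kl t) := by
  unfold pvExpandir
  rw [show ((0 : Int)) = ((0 : Nat) : Int) from rfl,
      L_exp_aux kl texto.length [] 0 (by simpa using List.length_pos_iff.mpr hk)]
  simp [pvK]

theorem L_vig (bl kl : List Char) (hk : kl ≠ []) :
    pvCifraVigenere bl kl = (List.range bl.length).map (fun j => fV (pvK kl j) (bl.getD j ' ')) := by
  unfold pvCifraVigenere
  rw [L_exp _ _ hk]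
  rw [PySem.List.foldl_append_singleton_eq_map]
  rw [List.nil_append]
  apply List.map_congr_left
  intro j hj
  rw [List.mem_range] at hj
  simp only [PySem.List.pyGetD_natCast]
  rw [PySem.List.getD_map_range _ _ _ _ hj]
  rfl

theorem L_aff (bl kl : List Char) :
    pvCifraAffine bl kl = bl.map (fAf (pvAjusta (pvA0 kl)) (pvB0 kl)) := by
  show List.foldl (fun acc ch =>
      if PySem.Chars.isIn [ch] pvAlfAff then
        acc ++ [PySem.List.pyGetD pvAlfAff
          (PySem.Int.mod (pvAjusta (pvA0 kl) * PySem.Chars.find pvAlfAff [ch] + pvB0 kl) 37) ' ']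
      else acc ++ [ch]) [] bl = _
  refine Eq.trans (PySem.List.foldl_congr_mem _ _
    (fun acc ch => acc ++ [fAf (pvAjusta (pvA0 kl)) (pvB0 kl) ch]) _ ?_) ?_
  · intro acc x _
    by_cases h : PySem.Chars.isIn [x] pvAlfAff
    · simp [fAf, h]
    · simp [fAf, h]
  · rw [PySem.List.foldl_append_singleton_eq_map, List.nil_append]

theorem L_rep_flat (kl : List Char) (hk : kl ≠ []) :
    ∀ (mm j : Nat), j < kl.length * mm →
    ((List.replicate mm kl).flatten).getD j ' ' = kl.getD (j % kl.length) ' ' := by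
  intro mm
  induction mm with
  | zero => intro j hj; omega
  | succ mm ih =>
    intro j hj
    have hms : kl.length * (mm + 1) = kl.length * mm + kl.length := Nat.mul_succ _ _
    rw [List.replicate_succ, List.flatten_cons]
    by_cases h : j < kl.length
    · rw [List.getD_append _ _ _ _ h, Nat.mod_eq_of_lt h]
    · rw [List.getD_append_right _ _ _ _ (by omega)]
      rw [ih (j - kl.length) (by omega)]
      congr 1
      exact (Nat.mod_eq_sub_mod (by omega)).symm

theorem L_chave (kl : List Char) (hk : kl ≠ []) (n j : Nat) (hj : j < n) :
    (PySem.List.slice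
      (PySem.List.pyRepeat kl (PySem.Int.floordiv (n : Int) (kl.length : Int) + 1))
      none (some (n : Int))).getD j ' ' = pvK kl j := by
  have hkpos : 0 < kl.length := List.length_pos_iff.mpr hk
  rw [PySem.List.slice_to_natCast]
  have hrep : PySem.List.pyRepeat kl (PySem.Int.floordiv (n : Int) (kl.length : Int) + 1)
      = (List.replicate (n / kl.length + 1) kl).flatten := by
    rw [PySem.Int.floordiv_natCast]
    show (List.replicate ((((n / kl.length : Nat) : Int) + 1)).toNat kl).flatten = _
    congr 1
  rw [hrep]
  have hbound : j < kl.length * (n / kl.length + 1) := by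
    have h1 := Nat.div_add_mod n kl.length
    have h2 := Nat.mod_lt n hkpos
    have h3 : kl.length * (n / kl.length + 1) = kl.length * (n / kl.length) + kl.length :=
      Nat.mul_succ kl.length (n / kl.length)
    omega
  rw [List.getD_eq_getElem?_getD, List.getElem?_take, if_pos hj, ← List.getD_eq_getElem?_getD]
  exact L_rep_flat kl hk _ j hbound

theorem L_alb (bl kl : List Char) (hk : kl ≠ []) :
    pvCifraAlberti bl kl = (List.range bl.length).map (fun j => fAl (pvK kl j) (bl.getD j ' ')) := by
  show List.foldl (fun acc (i : Nat) =>
      if PySem.Chars.isIn [PySem.List.pyGetD bl (i : Int) ' '] pvAlfAlb then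
        acc ++ [PySem.List.pyGetD pvAlfAlb
          (PySem.Int.mod
            (PySem.Chars.find pvAlfAlb
              [PySem.List.pyGetD
                (PySem.List.slice
                  (PySem.List.pyRepeat kl
                    (PySem.Int.floordiv (bl.length : Int) (kl.length : Int) + 1))
                  none (some (bl.length : Int))) (i : Int) ' ']
             - PySem.Chars.find pvAlfAlb [PySem.List.pyGetD bl (i : Int) ' ']) 36) ' ']
      else acc ++ [PySem.List.pyGetD bl (i : Int) ' ']) [] (List.range bl.length) = _
  refine Eq.trans (PySem.List.foldl_congr_mem _ _
    (fun acc (i : Nat) => acc ++ [fAl (pvK kl i) (bl.getD i ' ')]) _ ?_) ?_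
  · intro acc i hi
    rw [List.mem_range] at hi
    simp only [PySem.List.pyGetD_natCast]
    rw [L_chave kl hk bl.length i hi]
    simp only [fAl, List.getD_eq_getElem?_getD]
    split_ifs <;> rfl
  · rw [PySem.List.foldl_append_singleton_eq_map, List.nil_append]

theorem L_round (bl kl : List Char) (hk : kl ≠ []) :
    pvCifraVigenere (pvCifraAffine (pvCifraAlberti bl kl) kl) kl
      = (List.range bl.length).map
          (fun j => pvG (pvAjusta (pvA0 kl)) (pvB0 kl) (pvK kl j) (bl.getD j ' ')) := by
  rw [L_alb bl kl hk, L_aff, L_vig _ kl hk]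
  rw [List.map_map, List.length_map, List.length_range]
  apply List.map_congr_left
  intro j hj
  rw [List.mem_range] at hj
  rw [PySem.List.getD_map_range _ _ _ _ hj]
  rfl

theorem L_two (bl kl : List Char) (hk : kl ≠ []) :
    (List.range 2).foldl (fun bl2 _ => pvCifraVigenere (pvCifraAffine (pvCifraAlberti bl2 kl) kl) kl) bl
      = (List.range bl.length).map (fun j => pvH kl j (bl.getD j ' ')) := by
  rw [show List.range 2 = [0, 1] from rfl]
  simp only [List.foldl_cons, List.foldl_nil]
  rw [L_round bl kl hk, L_round _ kl hk]
  rw [List.length_map, List.length_range]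
  apply List.map_congr_left
  intro j hj
  rw [List.mem_range] at hj
  rw [PySem.List.getD_map_range _ _ _ _ hj]
  rfl

theorem L_take_getD (x : List Char) (j : Nat) (hj : j < 16) :
    (x.take 16).getD j ' ' = x.getD j ' ' := by
  rw [List.getD_eq_getElem?_getD, List.getElem?_take, if_pos hj, ← List.getD_eq_getElem?_getD]

theorem L_drop_getD (x : List Char) (m i : Nat) :
    (x.drop m).getD i ' ' = x.getD (m + i) ' ' := by
  rw [List.getD_eq_getElem?_getD, List.getElem?_drop, ← List.getD_eq_getElem?_getD]

theorem L_flat (F : Nat → Char → Char) :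
    ∀ (q : Nat) (l : List Char), l.length ≤ 16 * q →
    (List.range q).flatMap (fun k =>
        (List.range ((l.drop (16 * k)).take 16).length).map
          (fun j => F j (((l.drop (16 * k)).take 16).getD j ' ')))
      = (List.range l.length).map (fun i => F (i % 16) (l.getD i ' ')) := by
  intro q
  induction q with
  | zero =>
    intro l hlen
    have : l = [] := List.length_eq_zero_iff.mp (by omega)
    subst this
    simp
  | succ q ih =>
    intro l hlen
    rw [List.range_succ_eq_map, List.flatMap_cons, List.flatMap_map]
    have hdrop1 : ∀ k : Nat, l.drop (16 * Nat.succ k) = (l.drop 16).drop (16 * k) := by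
      intro k
      rw [List.drop_drop]
      congr 1
      omega
    have htail : (List.range q).flatMap (fun k =>
        (List.range ((l.drop (16 * Nat.succ k)).take 16).length).map
          (fun j => F j (((l.drop (16 * Nat.succ k)).take 16).getD j ' ')))
        = (List.range (l.drop 16).length).map
            (fun i => F (i % 16) ((l.drop 16).getD i ' ')) := by
      have hfun : (fun k =>
          (List.range ((l.drop (16 * Nat.succ k)).take 16).length).map
            (fun j => F j (((l.drop (16 * Nat.succ k)).take 16).getD j ' ')))
          = (fun k =>
          (List.range (((l.drop 16).drop (16 * k)).take 16).length).map
            (fun j => F j ((((l.drop 16).drop (16 * k)).take 16).getD j ' '))) :=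
        funext fun k => by rw [hdrop1 k]
      rw [hfun]
      exact ih (l.drop 16) (by simp; omega)
    rw [htail]
    simp only [Nat.mul_zero, List.drop_zero, List.length_take, List.length_drop]
    by_cases hn : l.length ≤ 16
    · have h0 : l.length - 16 = 0 := by omega
      rw [h0]
      simp only [List.range_zero, List.map_nil, List.append_nil]
      rw [Nat.min_eq_right hn]
      apply List.map_congr_left
      intro j hj
      rw [List.mem_range] at hj
      rw [L_take_getD l j (by omega), Nat.mod_eq_of_lt (by omega)]
    · have hsplit : l.length = 16 + (l.length - 16) := by omega
      conv_rhs => rw [hsplit, List.range_add, List.map_append]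
      congr 1
      · rw [Nat.min_eq_left (by omega)]
        apply List.map_congr_left
        intro j hj
        rw [List.mem_range] at hj
        rw [L_take_getD l j hj, Nat.mod_eq_of_lt (by omega)]
      · rw [List.map_map]
        apply List.map_congr_left
        intro i _
        simp only [Function.comp]
        rw [Nat.add_mod_left, L_drop_getD]

theorem L_enum {β : Type} (f : Int × Char → β) :
    ∀ (l : List Char) (s : Nat),
    (PySem.List.enumerate l (s : Int)).map f
      = (List.range l.length).map (fun t => f (((s + t : Nat) : Int), l.getD t ' ')) := by
  intro l
  induction l with
  | nil => intro s; simp [PySem.List.enumerate]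
  | cons x t ih =>
    intro s
    show f ((s : Int), x) :: (PySem.List.enumerate t ((s : Int) + 1)).map f = _
    rw [show ((s : Int) + 1) = (((s + 1 : Nat)) : Int) by push_cast; ring, ih (s + 1)]
    rw [List.length_cons, List.range_succ_eq_map, List.map_cons, List.map_map]
    refine congrArg₂ _ ?_ ?_
    · simp
    · apply List.map_congr_left
      intro t' _
      simp only [Function.comp, Nat.succ_eq_add_one, List.getD_cons_succ]
      refine congrArg f ?_
      rw [Prod.mk.injEq]
      exact ⟨by push_cast; ring, rfl⟩

-- ===== VERDICT (by name: the statement is the Claim_ definition above) =====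
theorem cifra_texto_bloco_spec : Claim_equal_cifra_texto_bloco := by
  intro text key _hdom hpre
  unfold Spec_cifra_texto_bloco
  have hAdef : cifra_texto_bloco text key
      = String.ofList (((PySem.List.pyRange 0 (text.toList.length : Int) 16).map
          (fun i => PySem.List.slice text.toList (some i) (some (i + 16)))).foldl
          (fun acc bloco => acc ++ (List.range 2).foldl
            (fun bl _ => pvCifraVigenere (pvCifraAffine (pvCifraAlberti bl key.toList) key.toList) key.toList)
            bloco) []) := rfl
  have hBdef : cifra_texto_bloco_alt text key
      = String.ofList ((PySem.List.enumerate text.toList 0).foldl (fun acc ic =>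
          acc ++ [pvStep (if pvA0 key.toList = 0 then 1 else pvA0 key.toList) (pvB0 key.toList)
            (PySem.List.pyGetD key.toList
              (PySem.Int.mod (PySem.Int.mod ic.1 16) (key.toList.length : Int)) ' ')
            (pvStep (if pvA0 key.toList = 0 then 1 else pvA0 key.toList) (pvB0 key.toList)
              (PySem.List.pyGetD key.toList
                (PySem.Int.mod (PySem.Int.mod ic.1 16) (key.toList.length : Int)) ' ')
              ic.2)]) []) := rfl
  rw [hAdef, hBdef]
  by_cases hl : text.toList = []
  · rw [hl]
    rfl
  · have hk : key.toList ≠ [] := by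
      rcases hpre with h | h
      · exact absurd (by rw [h]; rfl) hl
      · intro h0
        exact h (String.toList_inj.mp h0)
    congr 1
    trans (List.range text.toList.length).map
      (fun i => pvH key.toList (i % 16) (text.toList.getD i ' '))
    · -- A side
      rw [PySem.List.foldl_append_eq_flatMap, List.nil_append]
      have hn0 : 0 < text.toList.length := List.length_pos_iff.mpr hl
      have hq2 : (PySem.List.pyRange 0 (text.toList.length : Int) 16).map
          (fun i => PySem.List.slice text.toList (some i) (some (i + 16)))
          = (List.range ((text.toList.length + 15) / 16)).map
              (fun k => (text.toList.drop (16 * k)).take 16) := by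
        rw [PySem.List.pyRange_of_pos 0 ((text.toList.length : Int)) (show (0:Int) < 16 by norm_num)]
        rw [if_pos (show (0:Int) < (text.toList.length : Int) by exact_mod_cast hn0)]
        have hqq : (((text.toList.length : Int) - 0 + 16 - 1) / 16).toNat
            = (text.toList.length + 15) / 16 := by
          rw [show ((text.toList.length : Int) - 0 + 16 - 1)
              = (((text.toList.length + 15 : Nat)) : Int) by push_cast; ring]
          rw [show ((16 : Int)) = (((16 : Nat)) : Int) from rfl]
          rw [← Int.natCast_div, Int.toNat_natCast]
        rw [hqq, List.map_map]
        apply List.map_congr_left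
        intro k _
        show PySem.List.slice text.toList (some (0 + 16 * (k : Int)))
            (some (0 + 16 * (k : Int) + 16)) = _
        rw [show (0 + 16 * (k : Int)) = (((16 * k : Nat)) : Int) by push_cast; ring]
        rw [show ((((16 * k : Nat)) : Int) + 16)
            = ((((16 * k : Nat)) : Int) + (((16 : Nat)) : Int)) from rfl]
        exact PySem.List.slice_natCast_add text.toList (16 * k) 16
      rw [hq2, List.flatMap_map]
      beta_reduce
      have hfun : (fun k => (List.range 2).foldl
            (fun bl _ => pvCifraVigenere (pvCifraAffine (pvCifraAlberti bl key.toList) key.toList) key.toList)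
            ((text.toList.drop (16 * k)).take 16))
          = (fun k => (List.range ((text.toList.drop (16 * k)).take 16).length).map
              (fun j => pvH key.toList j (((text.toList.drop (16 * k)).take 16).getD j ' '))) :=
        funext fun k => L_two _ key.toList hk
      rw [hfun]
      exact L_flat (fun j c => pvH key.toList j c) _ text.toList (by omega)
    · -- B side
      symm
      rw [PySem.List.foldl_append_singleton_eq_map, List.nil_append]
      rw [show PySem.List.enumerate text.toList 0
            = PySem.List.enumerate text.toList (((0 : Nat)) : Int) from rfl, L_enum]
      apply List.map_congr_left
      intro i hi
      rw [List.mem_range] at hi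
      simp only [Nat.zero_add]
      have h16 : PySem.Int.mod ((i : Nat) : Int) 16 = (((i % 16 : Nat)) : Int) :=
        PySem.Int.mod_natCast i 16
      rw [h16, PySem.Int.mod_natCast (i % 16) key.toList.length, PySem.List.pyGetD_natCast]
      rw [L_step, L_step]
      rw [← L_ajusta (pvA0 key.toList)
        (PySem.Int.mod_nonneg _ (by norm_num)) (PySem.Int.mod_lt _ (by norm_num))]
      rfl
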